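-- pv_equiv track=rewrite | github.com/ChahelPaatur/Self-Modifying-Program-Synthesis-via-Online-Library-Evolution | smpma_agi.py | center_bbox
-- ===== SOURCE A (Python) =====
-- def center_bbox(grid):
--     """
--     Translate all non-zero cells so the overall bounding box is centered in the grid.
--     Keeps grid size; out-of-bounds cells are clipped.
--     """
--     if not grid:
--         return grid
--     h, w = len(grid), len(grid[0])
--     min_r, max_r = h, -1
--     min_c, max_c = w, -1
--     for i in range(h):
--         for j in range(w):
--             if grid[i][j] != 0:
--                 min_r = min(min_r, i)
--                 max_r = max(max_r, i)
--                 min_c = min(min_c, j)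
--                 max_c = max(max_c, j)
--     if max_r < 0:
--         return grid
--     box_h = max_r - min_r + 1
--     box_w = max_c - min_c + 1
--     target_min_r = (h - box_h) // 2
--     target_min_c = (w - box_w) // 2
--     dr = target_min_r - min_r
--     dc = target_min_c - min_c
--     out = [[0] * w for _ in range(h)]
--     for i in range(h):
--         for j in range(w):
--             v = grid[i][j]
--             if v == 0:
--                 continue
--             ni, nj = i + dr, j + dc
--             if 0 <= ni < h and 0 <= nj < w:
--                 out[ni][nj] = v
--     return out
-- ===== SOURCE B (Python) =====
-- def center_bbox(grid):
--     """Center the non-zero bounding box: row/column projection + direct row construction.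
--
--     The bounding box is found by projecting onto rows and columns (first/last
--     non-empty projection index); since the centered box always fits inside the
--     grid, each output row is built directly by padding a slice of the source row
--     with zeros instead of scatter-writing cells into a mutable zero grid.
--     """
--     if not grid:
--         return grid
--     h, w = len(grid), len(grid[0])
--     rows_nz = [i for i in range(h) if any(grid[i][j] != 0 for j in range(w))]
--     if not rows_nz:
--         return grid
--     cols_nz = [j for j in range(w) if any(grid[i][j] != 0 for i in range(h))]
--     min_r, max_r = rows_nz[0], rows_nz[-1]
--     min_c, max_c = cols_nz[0], cols_nz[-1]
--     dr = (h - (max_r - min_r + 1)) // 2 - min_r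
--     dc = (w - (max_c - min_c + 1)) // 2 - min_c
--     pad = min_c + dc                 # left zero-padding of the centered box (always >= 0)
--     span = max_c - min_c + 1
--     out = []
--     for r in range(h):
--         i = r - dr
--         if min_r <= i <= max_r:
--             out.append([0] * pad
--                        + [grid[i][min_c + k] for k in range(span)]
--                        + [0] * (w - pad - span))
--         else:
--             out.append([0] * w)
--     return out
-- ===== Notes on version B (the rewrite author's own statement) =====
-- stated objective: faster
-- what changed: B finds the bounding box by projecting onto rows and columns (first/last index whose projection contains a non-zero, with short-circuiting any()) and builds each output row directly as zero-padding ++ a slice of the source row ++ zero-padding, exploiting that the centered box always fits, instead of A's inline min/max accumulator scan followed by scatter-writing individual non-zero cells into a mutable zero grid with a clipping test.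
import Mathlib
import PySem

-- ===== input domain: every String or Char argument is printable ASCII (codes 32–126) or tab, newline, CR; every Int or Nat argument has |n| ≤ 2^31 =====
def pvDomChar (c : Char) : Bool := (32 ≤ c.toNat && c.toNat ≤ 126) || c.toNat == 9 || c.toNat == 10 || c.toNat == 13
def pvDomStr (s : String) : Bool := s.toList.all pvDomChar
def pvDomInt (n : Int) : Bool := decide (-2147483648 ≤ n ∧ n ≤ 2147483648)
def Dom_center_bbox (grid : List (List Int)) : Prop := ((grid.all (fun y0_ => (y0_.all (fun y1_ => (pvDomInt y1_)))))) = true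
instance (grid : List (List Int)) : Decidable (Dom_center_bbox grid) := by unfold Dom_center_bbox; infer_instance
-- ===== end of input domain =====

-- B finds the bounding box by row/column projections (first/last projection index with a
-- non-zero) and builds each output row directly as padding ++ slice ++ padding (the centered
-- box always fits), instead of A's inline min/max accumulators and cell-by-cell scatter
-- writes into a mutable zero grid; same asymptotic cost, measurably faster by constant factor.

-- ===== PORT A =====
-- grid[i][j] for 0 ≤ i < h, 0 ≤ j < w; the defaults are unreachable under Pre_.
def pvCell (grid : List (List Int)) (i j : Nat) : Int := (grid.getD i []).getD j 0

-- the index pairs visited by 'for i in range(h): for j in range(w)'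
def pvPairs (h w : Nat) : List (Nat × Nat) :=
  (List.range h).flatMap (fun i => (List.range w).map (fun j => (i, j)))

-- out[i][j] = v
def pvWrite (out : List (List Int)) (i j : Nat) (v : Int) : List (List Int) :=
  out.modify i (fun row => row.set j v)

def center_bbox (grid : List (List Int)) : List (List Int) :=
  if grid.isEmpty then grid else
  let h := grid.length
  let w := grid.headI.length
  let s := (pvPairs h w).foldl
    (fun (s : Int × Int × Int × Int) p =>
      if pvCell grid p.1 p.2 != 0 then
        (min s.1 (p.1 : Int), max s.2.1 (p.1 : Int),
         min s.2.2.1 (p.2 : Int), max s.2.2.2 (p.2 : Int))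
      else s)
    ((h : Int), -1, (w : Int), -1)
  if s.2.1 < 0 then grid else
  let box_h := s.2.1 - s.1 + 1
  let box_w := s.2.2.2 - s.2.2.1 + 1
  let dr := PySem.Int.floordiv ((h : Int) - box_h) 2 - s.1
  let dc := PySem.Int.floordiv ((w : Int) - box_w) 2 - s.2.2.1
  (pvPairs h w).foldl
    (fun out p =>
      let v := pvCell grid p.1 p.2
      if v == 0 then out
      else
        let ni := (p.1 : Int) + dr
        let nj := (p.2 : Int) + dc
        if 0 ≤ ni ∧ ni < (h : Int) ∧ 0 ≤ nj ∧ nj < (w : Int) then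
          pvWrite out ni.toNat nj.toNat v
        else out)
    (List.replicate h (List.replicate w 0))

-- ===== PORT B =====
-- 'any(grid[i][j] != 0 for j in range(w))' / 'any(grid[i][j] != 0 for i in range(h))'
def pvRowNZ (grid : List (List Int)) (w i : Nat) : Bool :=
  (List.range w).any (fun j => pvCell grid i j != 0)
def pvColNZ (grid : List (List Int)) (h j : Nat) : Bool :=
  (List.range h).any (fun i => pvCell grid i j != 0)

def center_bbox_alt (grid : List (List Int)) : List (List Int) :=
  if grid.isEmpty then grid else
  let h := grid.length
  let w := grid.headI.length
  let rowsNZ := (List.range h).filter (pvRowNZ grid w)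
  if rowsNZ.isEmpty then grid else
  let colsNZ := (List.range w).filter (pvColNZ grid h)
  let min_r : Int := (rowsNZ.headI : Int)
  let max_r : Int := (rowsNZ.getLastD 0 : Int)
  let min_c : Int := (colsNZ.headI : Int)
  let max_c : Int := (colsNZ.getLastD 0 : Int)
  let dr := PySem.Int.floordiv ((h : Int) - (max_r - min_r + 1)) 2 - min_r
  let dc := PySem.Int.floordiv ((w : Int) - (max_c - min_c + 1)) 2 - min_c
  let pad := min_c + dc
  let span := max_c - min_c + 1
  (List.range h).map (fun (r : Nat) =>
    let i := (r : Int) - dr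
    if min_r ≤ i ∧ i ≤ max_r then
      List.replicate pad.toNat 0
        ++ (List.range span.toNat).map (fun k => pvCell grid i.toNat (min_c.toNat + k))
        ++ List.replicate ((w : Int) - pad - span).toNat 0
    else List.replicate w 0)

-- ===== PRECONDITION & SPEC =====
-- Pre_ excludes ragged grids whose later rows are shorter than the first row:
-- there Python A raises IndexError on grid[i][j] (and B raises the same way).
def Pre_center_bbox (grid : List (List Int)) : Prop :=
  ∀ row ∈ grid, grid.headI.length ≤ row.length
instance (grid : List (List Int)) : Decidable (Pre_center_bbox grid) := by
  unfold Pre_center_bbox; infer_instance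

def pvWitness_center_bbox : List (List Int) := [[0, 1], [2, 0]]

def Spec_center_bbox (grid : List (List Int)) (out : List (List Int)) : Prop := out = center_bbox_alt grid
instance (grid : List (List Int)) (out : List (List Int)) : Decidable (Spec_center_bbox grid out) := by unfold Spec_center_bbox; infer_instance

-- ===== CLAIM (what is proved, stated in full; the proofs are below) =====
def Claim_equal_center_bbox : Prop := ∀ (grid : List (List Int)), Dom_center_bbox grid → Pre_center_bbox grid → Spec_center_bbox grid (center_bbox grid)

-- ===== LEMMAS AND PROOFS =====

-- A's write pass, as a step function over the pre-filtered non-zero cells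
def pvStep (grid : List (List Int)) (dr dc : Int) (h w : Nat)
    (out : List (List Int)) (p : Nat × Nat) : List (List Int) :=
  if 0 ≤ (p.1 : Int) + dr ∧ (p.1 : Int) + dr < (h : Int) ∧
     0 ≤ (p.2 : Int) + dc ∧ (p.2 : Int) + dc < (w : Int) then
    pvWrite out ((p.1 : Int) + dr).toNat ((p.2 : Int) + dc).toNat (pvCell grid p.1 p.2)
  else out

theorem pv_mem_pairs {h w : Nat} {p : Nat × Nat} :
    p ∈ pvPairs h w ↔ p.1 < h ∧ p.2 < w := by
  cases p with
  | mk i j => simp [pvPairs]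

theorem pv_pairs_nodup (h w : Nat) : (pvPairs h w).Nodup := by
  exact List.Nodup.product (List.nodup_range) (List.nodup_range)

theorem pv_foldl_split (q : Nat × Nat → Bool) (L : List (Nat × Nat)) (a b c d : Int) :
    L.foldl
      (fun (s : Int × Int × Int × Int) p =>
        if q p then
          (min s.1 (p.1 : Int), max s.2.1 (p.1 : Int),
           min s.2.2.1 (p.2 : Int), max s.2.2.2 (p.2 : Int))
        else s) (a, b, c, d)
    = ((L.filter q).foldl (fun m p => min m (p.1 : Int)) a,
       (L.filter q).foldl (fun m p => max m (p.1 : Int)) b,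
       (L.filter q).foldl (fun m p => min m (p.2 : Int)) c,
       (L.filter q).foldl (fun m p => max m (p.2 : Int)) d) := by
  induction L generalizing a b c d with
  | nil => simp
  | cons p t ih => by_cases hq : q p <;> simp [hq, ih]

theorem pv_foldl_min_le (L : List Int) (a : Int) :
    List.foldl min a L ≤ a ∧ ∀ x ∈ L, List.foldl min a L ≤ x := by
  induction L generalizing a with
  | nil => simp
  | cons b t ih =>
    refine ⟨le_trans (ih (min a b)).1 (min_le_left a b), ?_⟩
    intro x hx
    rcases List.mem_cons.mp hx with h | h
    · subst h; exact le_trans (ih (min a x)).1 (min_le_right a x)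
    · exact (ih (min a b)).2 x h

theorem pv_foldl_max_ge (L : List Int) (a : Int) :
    a ≤ List.foldl max a L ∧ ∀ x ∈ L, x ≤ List.foldl max a L := by
  induction L generalizing a with
  | nil => simp
  | cons b t ih =>
    refine ⟨le_trans (le_max_left a b) (ih (max a b)).1, ?_⟩
    intro x hx
    rcases List.mem_cons.mp hx with h | h
    · subst h; exact le_trans (le_max_right a x) (ih (max a x)).1
    · exact (ih (max a b)).2 x h

theorem pv_foldl_min_mem (L : List Int) (a : Int) :
    List.foldl min a L = a ∨ List.foldl min a L ∈ L := by
  induction L generalizing a with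
  | nil => simp
  | cons b t ih =>
    rcases ih (min a b) with h | h
    · rcases min_choice a b with he | he
      · left; rw [List.foldl_cons, h, he]
      · right; rw [List.foldl_cons, h, he]; exact List.mem_cons_self
    · right; rw [List.foldl_cons]; exact List.mem_cons_of_mem _ h

theorem pv_foldl_max_mem (L : List Int) (a : Int) :
    List.foldl max a L = a ∨ List.foldl max a L ∈ L := by
  induction L generalizing a with
  | nil => simp
  | cons b t ih =>
    rcases ih (max a b) with h | h
    · rcases max_choice a b with he | he
      · left; rw [List.foldl_cons, h, he]
      · right; rw [List.foldl_cons, h, he]; exact List.mem_cons_self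
    · right; rw [List.foldl_cons]; exact List.mem_cons_of_mem _ h

theorem pv_getLastD_mem {α : Type} {L : List α} (hL : L ≠ []) (d : α) :
    L.getLastD d ∈ L := by
  induction L generalizing d with
  | nil => exact absurd rfl hL
  | cons a t ih =>
    cases t with
    | nil => simp
    | cons b u => simpa using List.mem_cons_of_mem a (ih (by simp) a)

theorem pv_headI_mem {α : Type} [Inhabited α] {L : List α} (hL : L ≠ []) :
    L.headI ∈ L := by
  cases L with
  | nil => exact absurd rfl hL
  | cons a t => simp

theorem pv_headI_le {L : List Nat} (hs : L.Pairwise (· < ·)) :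
    ∀ x ∈ L, L.headI ≤ x := by
  cases L with
  | nil => simp
  | cons a t =>
    intro x hx
    rcases List.mem_cons.mp hx with h | h
    · subst h; simp
    · exact le_of_lt ((List.pairwise_cons.mp hs).1 x h)

theorem pv_le_getLastD {L : List Nat} (hs : L.Pairwise (· < ·)) (d : Nat) (hd : ∀ x ∈ L, d ≤ x) :
    ∀ x ∈ L, x ≤ L.getLastD d := by
  induction L generalizing d with
  | nil => simp
  | cons a t ih =>
    intro x hx
    have hpair := List.pairwise_cons.mp hs
    rcases List.mem_cons.mp hx with h | h
    · subst h
      cases t with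
      | nil => simp
      | cons b u =>
        have := ih hpair.2 x (fun y hy => le_of_lt (hpair.1 y hy)) b (by simp)
        calc x ≤ b := le_of_lt (hpair.1 b (by simp))
          _ ≤ (x :: b :: u).getLastD d := by simpa using this
    · have := ih hpair.2 a (fun y hy => le_of_lt (hpair.1 y hy)) x h
      cases t with
      | nil => simp at h
      | cons b u => simpa using this

theorem pv_write_row (out : List (List Int)) (i j : Nat) (v : Int) (r : Nat) :
    (pvWrite out i j v).getD r [] = if r = i then (out.getD i []).set j v else out.getD r [] := by
  unfold pvWrite
  rw [List.getD_eq_getElem?_getD, List.getElem?_modify]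
  by_cases h : r = i
  · subst h
    cases hx : out[r]? with
    | none => simp [hx, List.getD_eq_getElem?_getD]
    | some row => simp [hx, List.getD_eq_getElem?_getD]
  · cases hx : out[r]? with
    | none => simp [hx, h, List.getD_eq_getElem?_getD, show i ≠ r from fun he => h he.symm]
    | some row => simp [hx, h, List.getD_eq_getElem?_getD, show i ≠ r from fun he => h he.symm]

theorem pv_write_length (out : List (List Int)) (i j : Nat) (v : Int) :
    (pvWrite out i j v).length = out.length := by
  simp [pvWrite]

theorem pv_cell_write_ne (out : List (List Int)) (i j : Nat) (v : Int) (r c : Nat)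
    (hne : r ≠ i ∨ c ≠ j) :
    pvCell (pvWrite out i j v) r c = pvCell out r c := by
  unfold pvCell
  rw [pv_write_row]
  split_ifs with h
  · subst h
    rcases hne with h' | h'
    · exact absurd rfl h'
    · rw [List.getD_eq_getElem?_getD, List.getElem?_set_ne (by omega),
        ← List.getD_eq_getElem?_getD]
  · rfl

theorem pv_cell_write_eq (out : List (List Int)) (i j : Nat) (v : Int)
    (hj : j < (out.getD i []).length) :
    pvCell (pvWrite out i j v) i j = v := by
  unfold pvCell
  rw [pv_write_row, if_pos rfl, List.getD_eq_getElem?_getD, List.getElem?_set_self hj]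
  rfl

theorem pv_step_dims (grid : List (List Int)) (dr dc : Int) (h w : Nat)
    (out : List (List Int)) (hlen : out.length = h)
    (hrow : ∀ r, r < h → (out.getD r []).length = w) (p : Nat × Nat) :
    (pvStep grid dr dc h w out p).length = h ∧
    ∀ r, r < h → ((pvStep grid dr dc h w out p).getD r []).length = w := by
  unfold pvStep
  split_ifs with hg
  · refine ⟨by rw [pv_write_length]; exact hlen, ?_⟩
    intro r hr
    rw [pv_write_row]
    split_ifs with he
    · rw [List.length_set]
      exact hrow _ (by omega)
    · exact hrow r hr
  · exact ⟨hlen, hrow⟩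

theorem pv_scatter_dims (grid : List (List Int)) (dr dc : Int) (h w : Nat)
    (L : List (Nat × Nat)) (out : List (List Int)) (hlen : out.length = h)
    (hrow : ∀ r, r < h → (out.getD r []).length = w) :
    (L.foldl (pvStep grid dr dc h w) out).length = h ∧
    ∀ r, r < h → ((L.foldl (pvStep grid dr dc h w) out).getD r []).length = w := by
  induction L generalizing out with
  | nil => exact ⟨hlen, hrow⟩
  | cons p t ih =>
    rw [List.foldl_cons]
    have hd := pv_step_dims grid dr dc h w out hlen hrow p
    exact ih _ hd.1 hd.2

theorem pv_scatter (grid : List (List Int)) (dr dc : Int) (h w : Nat)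
    (L : List (Nat × Nat)) (hnd : L.Nodup)
    (out : List (List Int)) (hlen : out.length = h)
    (hrow : ∀ r', r' < h → (out.getD r' []).length = w)
    (r c : Nat) (hr : r < h) (hc : c < w) :
    pvCell (L.foldl (pvStep grid dr dc h w) out) r c =
      if ∃ p ∈ L, (p.1 : Int) + dr = (r : Int) ∧ (p.2 : Int) + dc = (c : Int)
      then pvCell grid ((r : Int) - dr).toNat ((c : Int) - dc).toNat
      else pvCell out r c := by
  induction L generalizing out with
  | nil => simp
  | cons p t ih =>
    have hnd' := List.nodup_cons.mp hnd
    have hd := pv_step_dims grid dr dc h w out hlen hrow p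
    rw [List.foldl_cons, ih hnd'.2 _ hd.1 hd.2]
    by_cases hp : (p.1 : Int) + dr = (r : Int) ∧ (p.2 : Int) + dc = (c : Int)
    · -- p writes exactly cell (r, c); nothing in t touches it again
      have hnone : ¬ ∃ q ∈ t, (q.1 : Int) + dr = (r : Int) ∧ (q.2 : Int) + dc = (c : Int) := by
        rintro ⟨q, hqt, hq1, hq2⟩
        have hqp : q = p := by
          have e1 : q.1 = p.1 := by omega
          have e2 : q.2 = p.2 := by omega
          exact Prod.ext e1 e2
        exact hnd'.1 (hqp ▸ hqt)
      have hstep : pvStep grid dr dc h w out p = pvWrite out r c (pvCell grid p.1 p.2) := by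
        unfold pvStep
        rw [if_pos ⟨by omega, by omega, by omega, by omega⟩]
        congr 1 <;> omega
      rw [if_neg hnone, if_pos ⟨p, by simp, hp⟩, hstep,
        pv_cell_write_eq _ _ _ _ (by rw [hrow r hr]; exact hc)]
      congr 1 <;> omega
    · -- p leaves cell (r, c) untouched
      have hcell : pvCell (pvStep grid dr dc h w out p) r c = pvCell out r c := by
        unfold pvStep
        split_ifs with hg
        · apply pv_cell_write_ne
          by_cases h1 : ((p.1 : Int) + dr).toNat = r
          · exact Or.inr fun h2 => hp ⟨by omega, by omega⟩
          · exact Or.inl fun h2 => h1 h2.symm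
        · rfl
      rw [hcell]
      have hiff : (∃ q ∈ t, (q.1 : Int) + dr = (r : Int) ∧ (q.2 : Int) + dc = (c : Int)) ↔
          (∃ q ∈ (p :: t), (q.1 : Int) + dr = (r : Int) ∧ (q.2 : Int) + dc = (c : Int)) := by
        constructor
        · rintro ⟨q, hq, hq2⟩
          exact ⟨q, List.mem_cons_of_mem _ hq, hq2⟩
        · rintro ⟨q, hq, hq2⟩
          rcases List.mem_cons.mp hq with h' | h'
          · exact absurd (h' ▸ hq2) hp
          · exact ⟨q, h', hq2⟩
      exact if_congr hiff rfl rfl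

theorem pv_exists_target (grid : List (List Int)) (h w : Nat) (dr dc : Int) (r c : Nat)
    (hr : r < h) (hc : c < w) :
    ((∃ p ∈ (pvPairs h w).filter (fun p => pvCell grid p.1 p.2 != 0),
        (p.1 : Int) + dr = (r : Int) ∧ (p.2 : Int) + dc = (c : Int))
      ↔ (0 ≤ (r : Int) - dr ∧ (r : Int) - dr < (h : Nat) ∧ 0 ≤ (c : Int) - dc ∧
          (c : Int) - dc < (w : Nat) ∧
          pvCell grid ((r : Int) - dr).toNat ((c : Int) - dc).toNat ≠ 0)) := by
  constructor
  · rintro ⟨p, hp, h1, h2⟩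
    have hmem := List.mem_filter.mp hp
    have hb := pv_mem_pairs.mp hmem.1
    have hnz : pvCell grid p.1 p.2 ≠ 0 := by simpa using hmem.2
    refine ⟨by omega, by omega, by omega, by omega, ?_⟩
    have e1 : ((r : Int) - dr).toNat = p.1 := by omega
    have e2 : ((c : Int) - dc).toNat = p.2 := by omega
    rw [e1, e2]; exact hnz
  · rintro ⟨h1, h1b, h2, h2b, hnz⟩
    refine ⟨(((r : Int) - dr).toNat, ((c : Int) - dc).toNat), ?_, by omega, by omega⟩
    rw [List.mem_filter]
    exact ⟨pv_mem_pairs.mpr ⟨by omega, by omega⟩, by simpa using hnz⟩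

theorem pv_padded_get (a b : Nat) (seg : List Int) (c : Nat) :
    (List.replicate a (0 : Int) ++ seg ++ List.replicate b 0).getD c 0 =
      if c < a then 0 else if c - a < seg.length then seg.getD (c - a) 0 else 0 := by
  rw [List.getD_eq_getElem?_getD, List.append_assoc]
  by_cases h1 : c < a
  · rw [List.getElem?_append_left (by simpa using h1)]
    simp [h1, List.getElem?_replicate]
  · rw [List.getElem?_append_right (by simpa using not_lt.mp h1), List.length_replicate]
    by_cases h2 : c - a < seg.length
    · rw [List.getElem?_append_left h2]
      simp [h1, h2, List.getD_eq_getElem?_getD]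
    · rw [List.getElem?_append_right (not_lt.mp h2), if_neg h1, if_neg h2]
      simp only [List.getElem?_replicate]
      split_ifs <;> rfl

theorem pv_getD_eq_getElem {α : Type} (l : List α) (d : α) (i : Nat) (h : i < l.length) :
    l.getD i d = l[i] := by
  rw [List.getD_eq_getElem?_getD, List.getElem?_eq_getElem h]
  rfl

theorem pv_padded_getElem (a b : Nat) (seg : List Int) (c : Nat)
    (hc : c < (List.replicate a (0 : Int) ++ seg ++ List.replicate b 0).length) :
    (List.replicate a (0 : Int) ++ seg ++ List.replicate b 0)[c] =
      if c < a then 0 else if c - a < seg.length then seg.getD (c - a) 0 else 0 := by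
  rw [← pv_padded_get, pv_getD_eq_getElem _ 0 c hc]

theorem pv_map_range_getD (n : Nat) (g : Nat → Int) (k : Nat) (hk : k < n) :
    ((List.range n).map g).getD k 0 = g k := by
  rw [pv_getD_eq_getElem _ _ _ (by simpa using hk)]
  simp

-- the centered-box output, computed A's way (scatter) and B's way (row construction), agree
theorem pv_grid_eq (grid : List (List Int)) (h w : Nat) (mr Mr mc Mc dr dc : Int)
    (hdr : dr = PySem.Int.floordiv ((h : Int) - (Mr - mr + 1)) 2 - mr)
    (hdc : dc = PySem.Int.floordiv ((w : Int) - (Mc - mc + 1)) 2 - mc)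
    (hmr : 0 ≤ mr) (hmrMr : mr ≤ Mr) (hMr : Mr < (h : Int))
    (hmc : 0 ≤ mc) (hmcMc : mc ≤ Mc) (hMc : Mc < (w : Int))
    (hbox : ∀ i j : Nat, i < h → j < w → pvCell grid i j ≠ 0 →
      mr ≤ (i : Int) ∧ (i : Int) ≤ Mr ∧ mc ≤ (j : Int) ∧ (j : Int) ≤ Mc) :
    ((pvPairs h w).foldl
      (fun out p =>
        if pvCell grid p.1 p.2 == 0 then out
        else if 0 ≤ (p.1 : Int) + dr ∧ (p.1 : Int) + dr < (h : Int) ∧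
                0 ≤ (p.2 : Int) + dc ∧ (p.2 : Int) + dc < (w : Int) then
          pvWrite out ((p.1 : Int) + dr).toNat ((p.2 : Int) + dc).toNat (pvCell grid p.1 p.2)
        else out)
      (List.replicate h (List.replicate w 0)))
    = (List.range h).map (fun (r : Nat) =>
        if mr ≤ (r : Int) - dr ∧ (r : Int) - dr ≤ Mr then
          List.replicate (mc + dc).toNat 0
            ++ (List.range (Mc - mc + 1).toNat).map
                 (fun k => pvCell grid ((r : Int) - dr).toNat (mc.toNat + k))
            ++ List.replicate ((w : Int) - (mc + dc) - (Mc - mc + 1)).toNat 0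
        else List.replicate w 0) := by
  -- arithmetic facts about the centering offsets (the centered box always fits)
  have hdr' : dr = ((h : Int) - (Mr - mr + 1)) / 2 - mr := by
    rw [hdr, PySem.Int.floordiv_eq_ediv_of_pos (by omega)]
  have hdc' : dc = ((w : Int) - (Mc - mc + 1)) / 2 - mc := by
    rw [hdc, PySem.Int.floordiv_eq_ediv_of_pos (by omega)]
  have hrow0 : 0 ≤ mr + dr := by omega
  have hrowspan : mr + dr + (Mr - mr + 1) ≤ (h : Int) := by omega
  have hpad0 : 0 ≤ mc + dc := by omega
  have hpadspan : mc + dc + (Mc - mc + 1) ≤ (w : Int) := by omega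
  -- A's inline loop is the scatter loop over the pre-filtered non-zero cells
  have estep : (fun (out : List (List Int)) (p : Nat × Nat) =>
        if (pvCell grid p.1 p.2 != 0) = true then pvStep grid dr dc h w out p else out)
      = (fun out p =>
        if pvCell grid p.1 p.2 == 0 then out
        else if 0 ≤ (p.1 : Int) + dr ∧ (p.1 : Int) + dr < (h : Int) ∧
                0 ≤ (p.2 : Int) + dc ∧ (p.2 : Int) + dc < (w : Int) then
          pvWrite out ((p.1 : Int) + dr).toNat ((p.2 : Int) + dc).toNat (pvCell grid p.1 p.2)
        else out) := by
    funext out p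
    unfold pvStep
    cases hz : pvCell grid p.1 p.2 == 0 <;> simp [bne, hz]
  rw [← estep, ← List.foldl_filter]
  have hinit_len : (List.replicate h (List.replicate w (0 : Int))).length = h := by simp
  have hinit_row : ∀ r, r < h →
      ((List.replicate h (List.replicate w (0 : Int))).getD r []).length = w := by
    intro r hr
    rw [List.getD_eq_getElem?_getD, List.getElem?_replicate, if_pos hr]
    simp
  have hnodup : ((pvPairs h w).filter (fun p => pvCell grid p.1 p.2 != 0)).Nodup :=
    (pv_pairs_nodup h w).filter _
  have hdims := pv_scatter_dims grid dr dc h w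
    ((pvPairs h w).filter (fun p => pvCell grid p.1 p.2 != 0)) _ hinit_len hinit_row
  apply List.ext_getElem
  · rw [hdims.1]; simp
  intro r h1 h2
  have hrh : r < h := by rw [hdims.1] at h1; exact h1
  rw [List.getElem_map, List.getElem_range]
  apply List.ext_getElem
  · rw [← pv_getD_eq_getElem _ [] r h1, hdims.2 r hrh]
    split_ifs with hin
    · rw [List.length_append, List.length_append, List.length_replicate,
        List.length_map, List.length_range, List.length_replicate]
      omega
    · simp
  intro c hc1 hc2
  have hcw : c < w := by
    rw [← pv_getD_eq_getElem _ [] r h1, hdims.2 r hrh] at hc1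
    exact hc1
  have eL : (List.foldl (pvStep grid dr dc h w)
        (List.replicate h (List.replicate w 0))
        ((pvPairs h w).filter (fun p => pvCell grid p.1 p.2 != 0)))[r][c] =
      pvCell (List.foldl (pvStep grid dr dc h w)
        (List.replicate h (List.replicate w 0))
        ((pvPairs h w).filter (fun p => pvCell grid p.1 p.2 != 0))) r c := by
    rw [pvCell, pv_getD_eq_getElem _ [] r h1, pv_getD_eq_getElem _ 0 c hc1]
  rw [eL, pv_scatter grid dr dc h w _ hnodup _ hinit_len hinit_row r c hrh hcw]
  simp only [pv_exists_target grid h w dr dc r c hrh hcw]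
  have einit : pvCell (List.replicate h (List.replicate w (0 : Int))) r c = 0 := by
    unfold pvCell
    simp [List.getD_eq_getElem?_getD, List.getElem?_replicate, hrh, hcw]
  rw [einit]
  split_ifs with hC1 hC2 hC2
  · -- A writes this cell, and the row is inside the centered box rows
    obtain ⟨g1, g2, g3, g4, g5⟩ := hC1
    rw [pv_padded_getElem]
    have hb := hbox ((r : Int) - dr).toNat ((c : Int) - dc).toNat (by omega) (by omega) g5
    rw [List.length_map, List.length_range]
    split_ifs with hlt hsp
    · exfalso; omega
    · rw [pv_map_range_getD _ _ _ hsp]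
      have e : mc.toNat + (c - (mc + dc).toNat) = ((c : Int) - dc).toNat := by omega
      rw [e]
    · exfalso; omega
  · -- A writes this cell but the row would be outside the box rows: impossible
    exfalso
    obtain ⟨g1, g2, g3, g4, g5⟩ := hC1
    have hb := hbox ((r : Int) - dr).toNat ((c : Int) - dc).toNat (by omega) (by omega) g5
    omega
  · -- A leaves the cell zero; B's row may still cover it, with a zero value
    rw [pv_padded_getElem]
    rw [List.length_map, List.length_range]
    split_ifs with hlt hsp
    · rfl
    · rw [pv_map_range_getD _ _ _ hsp]
      have e : mc.toNat + (c - (mc + dc).toNat) = ((c : Int) - dc).toNat := by omega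
      rw [e]
      by_cases hz : pvCell grid ((r : Int) - dr).toNat ((c : Int) - dc).toNat = 0
      · rw [hz]
      · exact absurd ⟨by omega, by omega, by omega, by omega, hz⟩ hC1
    · rfl
  · -- outside the box rows: both sides are zero
    rw [List.getElem_replicate]

theorem pv_mem_rows (grid : List (List Int)) (h w : Nat) (z : Int) :
    z ∈ ((pvPairs h w).filter (fun p => pvCell grid p.1 p.2 != 0)).map
          (fun p => ((p.1 : Nat) : Int))
    ↔ ∃ i ∈ (List.range h).filter (pvRowNZ grid w), z = ((i : Nat) : Int) := by
  constructor
  · intro hz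
    rcases List.mem_map.mp hz with ⟨p, hp, hpz⟩
    rcases List.mem_filter.mp hp with ⟨hpp, hnz⟩
    have hb := pv_mem_pairs.mp hpp
    refine ⟨p.1, List.mem_filter.mpr ⟨List.mem_range.mpr hb.1, ?_⟩, hpz.symm⟩
    simp only [pvRowNZ]
    exact List.any_eq_true.mpr ⟨p.2, List.mem_range.mpr hb.2, hnz⟩
  · rintro ⟨i, hi, rfl⟩
    rcases List.mem_filter.mp hi with ⟨hih, hrow⟩
    simp only [pvRowNZ] at hrow
    rcases List.any_eq_true.mp hrow with ⟨j, hj, hnz⟩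
    exact List.mem_map.mpr ⟨(i, j), List.mem_filter.mpr
      ⟨pv_mem_pairs.mpr ⟨List.mem_range.mp hih, List.mem_range.mp hj⟩, hnz⟩, rfl⟩

theorem pv_mem_cols (grid : List (List Int)) (h w : Nat) (z : Int) :
    z ∈ ((pvPairs h w).filter (fun p => pvCell grid p.1 p.2 != 0)).map
          (fun p => ((p.2 : Nat) : Int))
    ↔ ∃ j ∈ (List.range w).filter (pvColNZ grid h), z = ((j : Nat) : Int) := by
  constructor
  · intro hz
    rcases List.mem_map.mp hz with ⟨p, hp, hpz⟩
    rcases List.mem_filter.mp hp with ⟨hpp, hnz⟩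
    have hb := pv_mem_pairs.mp hpp
    refine ⟨p.2, List.mem_filter.mpr ⟨List.mem_range.mpr hb.2, ?_⟩, hpz.symm⟩
    simp only [pvColNZ]
    exact List.any_eq_true.mpr ⟨p.1, List.mem_range.mpr hb.1, hnz⟩
  · rintro ⟨j, hj, rfl⟩
    rcases List.mem_filter.mp hj with ⟨hjw, hcol⟩
    simp only [pvColNZ] at hcol
    rcases List.any_eq_true.mp hcol with ⟨i, hi, hnz⟩
    exact List.mem_map.mpr ⟨(i, j), List.mem_filter.mpr
      ⟨pv_mem_pairs.mpr ⟨List.mem_range.mp hi, List.mem_range.mp hjw⟩, hnz⟩, rfl⟩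

theorem pv_min_eq (M : List Int) (S : List Nat)
    (hSmem : ∀ z, z ∈ M ↔ ∃ i ∈ S, z = ((i : Nat) : Int))
    (hs : S.Pairwise (· < ·)) (hS : S ≠ []) (a : Int) (ha : ∀ i ∈ S, ((i : Nat) : Int) < a) :
    List.foldl min a M = ((S.headI : Nat) : Int) := by
  have hhead : S.headI ∈ S := pv_headI_mem hS
  have hmemM : ((S.headI : Nat) : Int) ∈ M := (hSmem _).mpr ⟨S.headI, hhead, rfl⟩
  have h1 := (pv_foldl_min_le M a).2 _ hmemM
  rcases pv_foldl_min_mem M a with he | he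
  · have := ha S.headI hhead
    omega
  · rcases (hSmem _).mp he with ⟨i, hiS, hie⟩
    have := pv_headI_le hs i hiS
    omega

theorem pv_max_eq (M : List Int) (S : List Nat)
    (hSmem : ∀ z, z ∈ M ↔ ∃ i ∈ S, z = ((i : Nat) : Int))
    (hs : S.Pairwise (· < ·)) (hS : S ≠ []) :
    List.foldl max (-1) M = ((S.getLastD 0 : Nat) : Int) := by
  have hlast : S.getLastD 0 ∈ S := pv_getLastD_mem hS 0
  have hmemM : ((S.getLastD 0 : Nat) : Int) ∈ M := (hSmem _).mpr ⟨_, hlast, rfl⟩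
  have h1 := (pv_foldl_max_ge M (-1)).2 _ hmemM
  rcases pv_foldl_max_mem M (-1) with he | he
  · omega
  · rcases (hSmem _).mp he with ⟨i, hiS, hie⟩
    have := pv_le_getLastD hs 0 (fun _ _ => Nat.zero_le _) i hiS
    omega

theorem center_bbox_eq_alt (grid : List (List Int)) :
    center_bbox grid = center_bbox_alt grid := by
  cases hE : grid.isEmpty with
  | true => unfold center_bbox center_bbox_alt; rw [hE]; simp
  | false =>
    unfold center_bbox center_bbox_alt
    rw [hE]
    simp only [Bool.false_eq_true, if_false]
    rw [pv_foldl_split]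
    dsimp only
    by_cases hrows : (List.range grid.length).filter (pvRowNZ grid grid.headI.length) = []
    · -- no non-zero cell: both sides return the grid unchanged
      have hFl : (pvPairs grid.length grid.headI.length).filter
          (fun p => pvCell grid p.1 p.2 != 0) = [] := by
        rw [List.eq_nil_iff_forall_not_mem]
        intro p hp
        have hm : ((p.1 : Nat) : Int) ∈ ((pvPairs grid.length grid.headI.length).filter
            (fun p => pvCell grid p.1 p.2 != 0)).map (fun q => ((q.1 : Nat) : Int)) :=
          List.mem_map.mpr ⟨p, hp, rfl⟩
        rcases (pv_mem_rows grid grid.length grid.headI.length _).mp hm with ⟨i, hi, _⟩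
        rw [hrows] at hi
        exact absurd hi List.not_mem_nil
      rw [hFl, hrows]
      simp
    · -- a non-zero cell exists: identify the two bounding boxes and apply pv_grid_eq
      have hsr : ((List.range grid.length).filter (pvRowNZ grid grid.headI.length)).Pairwise
          (· < ·) := List.Pairwise.filter _ List.pairwise_lt_range
      have hcolsne : (List.range grid.headI.length).filter (pvColNZ grid grid.length) ≠ [] := by
        have hh := pv_headI_mem hrows
        rcases List.mem_filter.mp hh with ⟨hhr, hrnz⟩
        simp only [pvRowNZ] at hrnz
        rcases List.any_eq_true.mp hrnz with ⟨j, hj, hnz⟩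
        exact List.ne_nil_of_mem (List.mem_filter.mpr ⟨hj, by
          simp only [pvColNZ]
          exact List.any_eq_true.mpr ⟨_, hhr, hnz⟩⟩)
      have hsc : ((List.range grid.headI.length).filter (pvColNZ grid grid.length)).Pairwise
          (· < ·) := List.Pairwise.filter _ List.pairwise_lt_range
      have emr : List.foldl (fun (m : Int) (p : Nat × Nat) => min m ((p.1 : Nat) : Int))
            ((grid.length : Nat) : Int)
            ((pvPairs grid.length grid.headI.length).filter (fun p => pvCell grid p.1 p.2 != 0))
          = ((((List.range grid.length).filter (pvRowNZ grid grid.headI.length)).headI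
              : Nat) : Int) := by
        have efm : List.foldl min ((grid.length : Nat) : Int)
            (((pvPairs grid.length grid.headI.length).filter
              (fun p => pvCell grid p.1 p.2 != 0)).map (fun p => ((p.1 : Nat) : Int)))
            = List.foldl (fun (m : Int) (p : Nat × Nat) => min m ((p.1 : Nat) : Int))
              ((grid.length : Nat) : Int)
              ((pvPairs grid.length grid.headI.length).filter
                (fun p => pvCell grid p.1 p.2 != 0)) := by
          rw [List.foldl_map]
        rw [← efm]
        exact pv_min_eq _ _ (pv_mem_rows grid grid.length grid.headI.length) hsr hrows _
          (fun i hi => by exact_mod_cast List.mem_range.mp (List.mem_filter.mp hi).1)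
      have eMr : List.foldl (fun (m : Int) (p : Nat × Nat) => max m ((p.1 : Nat) : Int)) (-1)
            ((pvPairs grid.length grid.headI.length).filter (fun p => pvCell grid p.1 p.2 != 0))
          = ((((List.range grid.length).filter (pvRowNZ grid grid.headI.length)).getLastD 0
              : Nat) : Int) := by
        have efm : List.foldl max (-1 : Int)
            (((pvPairs grid.length grid.headI.length).filter
              (fun p => pvCell grid p.1 p.2 != 0)).map (fun p => ((p.1 : Nat) : Int)))
            = List.foldl (fun (m : Int) (p : Nat × Nat) => max m ((p.1 : Nat) : Int)) (-1)
              ((pvPairs grid.length grid.headI.length).filter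
                (fun p => pvCell grid p.1 p.2 != 0)) := by
          rw [List.foldl_map]
        rw [← efm]
        exact pv_max_eq _ _ (pv_mem_rows grid grid.length grid.headI.length) hsr hrows
      have emc : List.foldl (fun (m : Int) (p : Nat × Nat) => min m ((p.2 : Nat) : Int))
            ((grid.headI.length : Nat) : Int)
            ((pvPairs grid.length grid.headI.length).filter (fun p => pvCell grid p.1 p.2 != 0))
          = ((((List.range grid.headI.length).filter (pvColNZ grid grid.length)).headI
              : Nat) : Int) := by
        have efm : List.foldl min ((grid.headI.length : Nat) : Int)
            (((pvPairs grid.length grid.headI.length).filter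
              (fun p => pvCell grid p.1 p.2 != 0)).map (fun p => ((p.2 : Nat) : Int)))
            = List.foldl (fun (m : Int) (p : Nat × Nat) => min m ((p.2 : Nat) : Int))
              ((grid.headI.length : Nat) : Int)
              ((pvPairs grid.length grid.headI.length).filter
                (fun p => pvCell grid p.1 p.2 != 0)) := by
          rw [List.foldl_map]
        rw [← efm]
        exact pv_min_eq _ _ (pv_mem_cols grid grid.length grid.headI.length) hsc hcolsne _
          (fun j hj => by exact_mod_cast List.mem_range.mp (List.mem_filter.mp hj).1)
      have eMc : List.foldl (fun (m : Int) (p : Nat × Nat) => max m ((p.2 : Nat) : Int)) (-1)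
            ((pvPairs grid.length grid.headI.length).filter (fun p => pvCell grid p.1 p.2 != 0))
          = ((((List.range grid.headI.length).filter (pvColNZ grid grid.length)).getLastD 0
              : Nat) : Int) := by
        have efm : List.foldl max (-1 : Int)
            (((pvPairs grid.length grid.headI.length).filter
              (fun p => pvCell grid p.1 p.2 != 0)).map (fun p => ((p.2 : Nat) : Int)))
            = List.foldl (fun (m : Int) (p : Nat × Nat) => max m ((p.2 : Nat) : Int)) (-1)
              ((pvPairs grid.length grid.headI.length).filter
                (fun p => pvCell grid p.1 p.2 != 0)) := by
          rw [List.foldl_map]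
        rw [← efm]
        exact pv_max_eq _ _ (pv_mem_cols grid grid.length grid.headI.length) hsc hcolsne
      rw [emr, eMr, emc, eMc]
      rw [if_neg (by omega), if_neg (by simp [List.isEmpty_iff, hrows])]
      apply pv_grid_eq grid grid.length grid.headI.length _ _ _ _ _ _ rfl rfl
      · exact Int.natCast_nonneg _
      · exact_mod_cast pv_headI_le hsr _ (pv_getLastD_mem hrows 0)
      · exact_mod_cast List.mem_range.mp
          (List.mem_filter.mp (pv_getLastD_mem hrows 0)).1
      · exact Int.natCast_nonneg _
      · exact_mod_cast pv_headI_le hsc _ (pv_getLastD_mem hcolsne 0)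
      · exact_mod_cast List.mem_range.mp
          (List.mem_filter.mp (pv_getLastD_mem hcolsne 0)).1
      · intro i j hi hj hnz
        have hbne : (pvCell grid i j != 0) = true := by simpa using hnz
        have hrmem : i ∈ (List.range grid.length).filter (pvRowNZ grid grid.headI.length) :=
          List.mem_filter.mpr ⟨List.mem_range.mpr hi, by
            simp only [pvRowNZ]
            exact List.any_eq_true.mpr ⟨j, List.mem_range.mpr hj, hbne⟩⟩
        have hcmem : j ∈ (List.range grid.headI.length).filter (pvColNZ grid grid.length) :=
          List.mem_filter.mpr ⟨List.mem_range.mpr hj, by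
            simp only [pvColNZ]
            exact List.any_eq_true.mpr ⟨i, List.mem_range.mpr hi, hbne⟩⟩
        refine ⟨?_, ?_, ?_, ?_⟩
        · exact_mod_cast pv_headI_le hsr i hrmem
        · exact_mod_cast pv_le_getLastD hsr 0 (fun _ _ => Nat.zero_le _) i hrmem
        · exact_mod_cast pv_headI_le hsc j hcmem
        · exact_mod_cast pv_le_getLastD hsc 0 (fun _ _ => Nat.zero_le _) j hcmem

-- ===== VERDICT (by name: the statement is the Claim_ definition above) =====
theorem center_bbox_spec : Claim_equal_center_bbox := by
  intro grid _ _
  unfold Spec_center_bbox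
  exact center_bbox_eq_alt grid
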